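-- pv_equiv track=rewrite | github.com/hugoalmx/questoesccalgoritimos | Trabalho/AFN3.PY | mt_comprimento_par
-- ===== SOURCE A (Python) =====
-- def mt_comprimento_par(palavra):
--     # Definindo os estados
--     estado = "q0"  # Estado inicial
--
--     # Percorrendo a palavra, caractere por caractere
--     for simbolo in palavra:
--         if estado == "q0":
--             if simbolo == "a" or simbolo == "b":
--                 estado = "q1"  # Transita para o estado q1 quando encontra qualquer caractere
--             else:
--                 estado = "q_rejeitado"  # Caractere inválido, rejeita a palavra
--         elif estado == "q1":
--             if simbolo == "a" or simbolo == "b":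
--                 estado = "q0"  # Transita de volta para o estado q0 quando encontra outro caractere
--             else:
--                 estado = "q_rejeitado"  # Caractere inválido, rejeita a palavra
--
--         if estado == "q_rejeitado":
--             return False  # A palavra foi rejeitada se um caractere inválido for encontrado
--
--     # Aceita a palavra se o comprimento for par (se o estado final for q0)
--     return estado == "q0"
-- ===== SOURCE B (Python) =====
-- def mt_comprimento_par(palavra):
--     # Accept iff every character is 'a'/'b' and the length is even; no DFA state.
--     return len(palavra) % 2 == 0 and all(c == 'a' or c == 'b' for c in palavra)
-- ===== Notes on version B (the rewrite author's own statement) =====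
-- stated objective: simpler
-- what changed: Replaces the q0/q1 DFA state toggle with a direct boolean conjunction: even length via len()%2 and an all() validity check.
import Mathlib
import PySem

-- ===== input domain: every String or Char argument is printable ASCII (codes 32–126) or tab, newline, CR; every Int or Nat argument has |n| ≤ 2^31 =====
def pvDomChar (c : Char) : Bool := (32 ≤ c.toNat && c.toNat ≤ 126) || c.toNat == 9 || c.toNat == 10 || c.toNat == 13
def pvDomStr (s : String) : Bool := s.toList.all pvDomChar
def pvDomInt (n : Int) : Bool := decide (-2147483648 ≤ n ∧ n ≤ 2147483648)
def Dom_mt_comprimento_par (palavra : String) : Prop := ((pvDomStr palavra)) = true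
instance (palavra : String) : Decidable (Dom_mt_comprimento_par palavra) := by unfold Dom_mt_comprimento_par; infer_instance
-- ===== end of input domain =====

-- B replaces the q0/q1 DFA state toggle with a direct even-length-and-validity conjunction (objective: simpler).
-- ===== PORT A =====
def mtLoopA : List Char → String → Bool
  | [], estado => estado == "q0"
  | simbolo :: rest, estado =>
    let estado' :=
      if estado == "q0" then
        (if simbolo == 'a' || simbolo == 'b' then "q1" else "q_rejeitado")
      else if estado == "q1" then
        (if simbolo == 'a' || simbolo == 'b' then "q0" else "q_rejeitado")
      else estado
    if estado' == "q_rejeitado" then false else mtLoopA rest estado'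

def mt_comprimento_par (palavra : String) : Bool :=
  mtLoopA palavra.toList "q0"

-- ===== PORT B =====
def mt_comprimento_par_alt (palavra : String) : Bool :=
  (palavra.toList.length % 2 == 0) && palavra.toList.all (fun c => c == 'a' || c == 'b')

-- ===== PRECONDITION & SPEC =====
def Spec_mt_comprimento_par (palavra : String) (out : Bool) : Prop := out = mt_comprimento_par_alt palavra
instance (palavra : String) (out : Bool) : Decidable (Spec_mt_comprimento_par palavra out) := by unfold Spec_mt_comprimento_par; infer_instance

-- ===== CLAIM (what is proved, stated in full; the proofs are below) =====
def Claim_equal_mt_comprimento_par : Prop := ∀ (palavra : String), Dom_mt_comprimento_par palavra → Spec_mt_comprimento_par palavra (mt_comprimento_par palavra)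

-- ===== LEMMAS AND PROOFS =====
lemma mtLoopA_char : ∀ (l : List Char),
    (mtLoopA l "q0" = ((l.length % 2 == 0) && l.all (fun c => c == 'a' || c == 'b'))) ∧
    (mtLoopA l "q1" = ((l.length % 2 == 1) && l.all (fun c => c == 'a' || c == 'b'))) := by
  intro l
  induction l with
  | nil => constructor <;> rfl
  | cons c cs ih =>
    obtain ⟨ih0, ih1⟩ := ih
    constructor <;>
    · simp only [mtLoopA]
      by_cases h : (c == 'a' || c == 'b') = true <;>
        rcases Nat.mod_two_eq_zero_or_one cs.length with h2 | h2 <;>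
          simp [h, ih0, ih1, h2, Nat.add_mod]

-- ===== VERDICT (by name: the statement is the Claim_ definition above) =====
theorem mt_comprimento_par_spec : Claim_equal_mt_comprimento_par := by
  intro palavra _
  unfold Spec_mt_comprimento_par mt_comprimento_par mt_comprimento_par_alt
  exact (mtLoopA_char palavra.toList).1
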